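-- pv_equiv track=rewrite | github.com/furkanozev/Algorithm-Design | HW04 - PYTHON/HW4_Furkan_Ozev_161044036.py.py | part5_helper
-- ===== SOURCE A (Python) =====
-- def part5_helper(cost, price, day):
--
-- 	if len(cost) == 1:
-- 		gain = price[0] - cost[0]
-- 		return (gain, day)
-- 	else:
-- 		res1 = part5_helper(cost[:1], price[:1], day)
-- 		res2 = part5_helper(cost[1:], price[1:], day+1)
--
-- 		if res1[0] > res2[0]:
-- 			return res1
-- 		else:
-- 			return res2
-- ===== SOURCE B (Python) =====
-- def part5_helper(cost, price, day):
--     best_gain = price[0] - cost[0]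
--     best_day = day
--     d = day
--     for c, p in zip(cost[1:], price[1:]):
--         d += 1
--         if p - c >= best_gain:
--             best_gain = p - c
--             best_day = d
--     return (best_gain, best_day)
-- ===== Notes on version B (the rewrite author's own statement) =====
-- stated objective: faster
-- what changed: Replaced the divide-by-slicing recursion (each level copies list slices and recurses, picking the later day on ties) by a single left-to-right scan that keeps the best gain so far and updates on >= to keep the latest day.
import Mathlib
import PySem

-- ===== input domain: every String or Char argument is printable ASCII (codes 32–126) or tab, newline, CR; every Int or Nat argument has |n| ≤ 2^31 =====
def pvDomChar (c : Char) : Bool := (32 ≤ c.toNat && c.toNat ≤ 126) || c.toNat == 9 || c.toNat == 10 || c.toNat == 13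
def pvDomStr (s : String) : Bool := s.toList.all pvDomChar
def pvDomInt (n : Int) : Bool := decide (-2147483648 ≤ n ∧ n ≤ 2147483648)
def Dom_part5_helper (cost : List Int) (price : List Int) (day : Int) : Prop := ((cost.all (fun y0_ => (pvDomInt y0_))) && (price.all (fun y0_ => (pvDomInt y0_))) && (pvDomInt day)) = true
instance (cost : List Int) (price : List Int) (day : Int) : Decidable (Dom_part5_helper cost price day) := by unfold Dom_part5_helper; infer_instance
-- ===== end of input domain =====

-- B replaces A's slice-and-recurse max (O(n^2), ties to the later day) by one linear scan
-- updating on >=; equivalence proved on inputs where the Python A returns (cost nonempty,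
-- price at least as long as cost).

-- ===== PORT A =====
-- A recurses on cost: singleton case returns (price[0]-cost[0], day); otherwise combines
-- the results on cost[:1]/price[:1] and cost[1:]/price[1:], preferring res2 on ties.
-- price[0] is ported as List.headI: exact whenever price ≠ [] (guaranteed by Pre_;
-- outside it Python raises IndexError). cost[:1]=[c], price[:1]=take 1, [1:]=drop 1.
def part5_helper (cost : List Int) (price : List Int) (day : Int) : Int × Int :=
  match cost with
  | [] => (0, day)          -- unreachable: Python never returns on empty cost (infinite recursion)
  | [c] => (price.headI - c, day)
  | c :: c2 :: cs =>
      let res1 := part5_helper [c] (price.take 1) day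
      let res2 := part5_helper (c2 :: cs) (price.drop 1) (day + 1)
      if res1.1 > res2.1 then res1 else res2
termination_by cost.length
decreasing_by all_goals simp

-- ===== PORT B =====
-- one loop step of Source B: state (best_gain, best_day, d); d += 1, then update on p - c >= best_gain
def bStep (st : Int × Int × Int) (cp : Int × Int) : Int × Int × Int :=
  let d := st.2.2 + 1
  if cp.2 - cp.1 ≥ st.1 then (cp.2 - cp.1, d, d) else (st.1, st.2.1, d)

def part5_helper_alt (cost : List Int) (price : List Int) (day : Int) : Int × Int :=
  let bg := price.headI - cost.headI            -- price[0] - cost[0]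
  let r := ((cost.drop 1).zip (price.drop 1)).foldl bStep (bg, day, day)
  (r.1, r.2.1)

-- ===== PRECONDITION & SPEC =====
-- Pre_ is exactly where Python A returns: on empty cost A recurses forever (RecursionError),
-- and when price is shorter than cost some recursive call hits price[0] on [] (IndexError).
def Pre_part5_helper (cost : List Int) (price : List Int) (day : Int) : Prop :=
  cost ≠ [] ∧ cost.length ≤ price.length
instance (cost : List Int) (price : List Int) (day : Int) : Decidable (Pre_part5_helper cost price day) := by unfold Pre_part5_helper; infer_instance
def pvWitness_part5_helper : List Int × List Int × Int := ([1, 2], [3, 4], 0)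

def Spec_part5_helper (cost : List Int) (price : List Int) (day : Int) (out : Int × Int) : Prop := out = part5_helper_alt cost price day
instance (cost : List Int) (price : List Int) (day : Int) (out : Int × Int) : Decidable (Spec_part5_helper cost price day out) := by unfold Spec_part5_helper; infer_instance

-- ===== CLAIM (what is proved, stated in full; the proofs are below) =====
def Claim_equal_part5_helper : Prop := ∀ (cost : List Int) (price : List Int) (day : Int), Dom_part5_helper cost price day → Pre_part5_helper cost price day → Spec_part5_helper cost price day (part5_helper cost price day)

-- ===== LEMMAS AND PROOFS =====

-- A's tie-to-the-right combiner
def pvCombine (a b : Int × Int) : Int × Int := if a.1 > b.1 then a else b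

theorem pv_headI_take (p : List Int) : (p.take 1).headI = p.headI := by
  cases p <;> rfl

-- one-step unfolding lemmas for A's recursion
theorem pvA_singleton (c : Int) (p : List Int) (d : Int) :
    part5_helper [c] p d = (p.headI - c, d) := by
  rw [part5_helper]

theorem pvA_cons (c c2 : Int) (cs : List Int) (p : List Int) (d : Int) :
    part5_helper (c :: c2 :: cs) p d
      = pvCombine (p.headI - c, d) (part5_helper (c2 :: cs) (p.drop 1) (d + 1)) := by
  rw [part5_helper]
  simp [pvA_singleton, pv_headI_take, pvCombine]

-- folding one element into the state and then combining equals combining in A's order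
theorem pv_alg (bg bd g gd : Int) (R : Int × Int) :
    pvCombine (if g ≥ bg then (g, gd) else (bg, bd)) R
      = pvCombine (bg, bd) (pvCombine (g, gd) R) := by
  rcases R with ⟨r1, r2⟩
  simp only [pvCombine]
  split_ifs <;> first | rfl | (exfalso; omega)

-- loop invariant: B's fold over the remaining days equals A's recursion combined with the state
theorem pv_fold (cs : List Int) : ∀ (p : List Int) (bg bd d : Int), cs ≠ [] →
    cs.length ≤ p.length →
    (let r := (cs.zip p).foldl bStep (bg, bd, d); ((r.1, r.2.1) : Int × Int))
      = pvCombine (bg, bd) (part5_helper cs p (d + 1)) := by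
  induction cs with
  | nil => intro _ _ _ _ h; exact absurd rfl h
  | cons c cs ih =>
    intro p bg bd d _ hlen
    cases p with
    | nil => simp at hlen
    | cons q qs =>
      cases cs with
      | nil =>
        rw [pvA_singleton]
        simp only [List.zip, List.zipWith, List.foldl, bStep, pvCombine, List.headI]
        split_ifs <;> first | rfl | (exfalso; omega)
      | cons c2 cs2 =>
        have hlen2 : (c2 :: cs2).length ≤ qs.length := by
          simp only [List.length_cons] at hlen ⊢; omega
        have hzip : ((c :: c2 :: cs2).zip (q :: qs)).foldl bStep (bg, bd, d)
            = ((c2 :: cs2).zip qs).foldl bStep (bStep (bg, bd, d) (c, q)) := rfl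
        simp only [hzip]
        rw [pvA_cons]
        simp only [List.headI, List.drop, bStep]
        by_cases h : q - c ≥ bg
        · rw [if_pos h]
          rw [ih qs (q - c) (d + 1) (d + 1) (by simp) hlen2]
          rw [← pv_alg bg bd (q - c) (d + 1), if_pos h]
        · rw [if_neg h]
          rw [ih qs bg bd (d + 1) (by simp) hlen2]
          rw [← pv_alg bg bd (q - c) (d + 1), if_neg h]

-- ===== VERDICT (by name: the statement is the Claim_ definition above) =====
theorem part5_helper_spec : Claim_equal_part5_helper := by
  intro cost price day _ hpre
  rcases hpre with ⟨hne, hlen⟩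
  cases cost with
  | nil => exact absurd rfl hne
  | cons c cs =>
    cases price with
    | nil => simp at hlen
    | cons q qs =>
      cases cs with
      | nil =>
        show Spec_part5_helper [c] (q :: qs) day (part5_helper [c] (q :: qs) day)
        unfold Spec_part5_helper
        rw [pvA_singleton]
        rfl
      | cons c2 cs2 =>
        unfold Spec_part5_helper
        have hlen2 : (c2 :: cs2).length ≤ qs.length := by
          simp only [List.length_cons] at hlen ⊢; omega
        have hB : part5_helper_alt (c :: c2 :: cs2) (q :: qs) day
            = (let r := ((c2 :: cs2).zip qs).foldl bStep (q - c, day, day);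
               ((r.1, r.2.1) : Int × Int)) := rfl
        rw [hB, pv_fold (c2 :: cs2) qs (q - c) day day (by simp) hlen2]
        rw [pvA_cons]
        rfl
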